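-- pv_equiv track=rewrite | github.com/cgreggescalante/Challenges | ProjectEuler/Complete/90.py | forms_all
-- ===== SOURCE A (Python) =====
-- cubes = {1, 4, 9, 16, 25, 36, 49, 64, 81}
--
-- def forms_all(a, b):
--     poss = set()
--     if 6 in a:
--         a.add(9)
--     if 9 in a:
--         a.add(6)
--     if 6 in b:
--         b.add(9)
--     if 9 in b:
--         b.add(6)
--     for x in a:
--         for y in b:
--             poss.add(int(f"{x}{y}"))
--             poss.add(int(f"{y}{x}"))
--     return cubes.issubset(poss)
-- ===== SOURCE B (Python) =====
-- cubes = {1, 4, 9, 16, 25, 36, 49, 64, 81}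
--
--
-- def _with69(s):
--     # the 6<->9 rule, in one step: if the face-set touches {6, 9} it gets both
--     if not {6, 9}.isdisjoint(s):
--         s.update((6, 9))
--     return s
--
--
-- def _forms(a, b, c):
--     # can some pair (one face from each die) be concatenated to c, in either order?
--     return any(int(str(x) + str(y)) == c or int(str(y) + str(x)) == c
--                for y in b for x in a)
--
--
-- def forms_all(a, b):
--     _with69(a)
--     _with69(b)
--     return all(_forms(a, b, c) for c in cubes)
-- ===== Notes on version B (the rewrite author's own statement) =====
-- stated objective: alternative
-- what changed: Instead of materialising the set of all pairwise concatenations and then testing cubes.issubset, B loops over the nine target squares and short-circuit-searches, per target, for a pair of faces forming it (no intermediate set); the 6/9 mutation is done in one isdisjoint/update step instead of A's two chained membership branches.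
import Mathlib
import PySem

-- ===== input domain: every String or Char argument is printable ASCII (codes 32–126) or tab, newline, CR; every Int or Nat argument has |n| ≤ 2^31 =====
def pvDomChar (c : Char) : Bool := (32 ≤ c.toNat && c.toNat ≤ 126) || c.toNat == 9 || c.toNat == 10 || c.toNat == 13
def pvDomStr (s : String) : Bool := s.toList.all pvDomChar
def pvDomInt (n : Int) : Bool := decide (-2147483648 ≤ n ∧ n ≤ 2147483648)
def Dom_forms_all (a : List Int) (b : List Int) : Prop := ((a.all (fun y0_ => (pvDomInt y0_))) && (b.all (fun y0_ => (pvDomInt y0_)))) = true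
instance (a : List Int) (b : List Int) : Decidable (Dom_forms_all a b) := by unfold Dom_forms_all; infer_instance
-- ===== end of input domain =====

-- Header: B replaces A's "build the set of every concatenation, then one subset test" by a
-- per-target search with early exit over the nine squares (alternative decomposition, similar
-- cost), and folds A's two chained 6/9 membership branches into one isdisjoint/update step.
-- Both A and B mutate the argument sets in place (a set touching {6,9} ends up containing both,
-- the same final sets); the equivalence proved here is about the RETURN value.

-- ===== PORT A =====
-- int(f"{x}{y}") — exact via PySem.Int.ofChars? on str(x)+str(y); none (ValueError) is excluded by Pre_,
-- totalised with getD 0 (0 is never a cube, and nothing is claimed outside Pre_).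
def pvConcat (x y : Int) : Int :=
  (PySem.Int.ofChars? (PySem.Int.toChars x ++ PySem.Int.toChars y)).getD 0

-- A's 6↔9 mutation: two chained membership checks
def pvMut (s : PySem.Set Int) : PySem.Set Int :=
  let s1 := if PySem.Set.contains s 6 then PySem.Set.add s 9 else s
  if PySem.Set.contains s1 9 then PySem.Set.add s1 6 else s1

def pvCubes : PySem.Set Int := PySem.Set.ofList [1, 4, 9, 16, 25, 36, 49, 64, 81]

def forms_all (a : List Int) (b : List Int) : Bool :=
  let a2 := pvMut a
  let b2 := pvMut b
  let poss := a2.foldl (fun p x =>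
      b2.foldl (fun p y =>
        PySem.Set.add (PySem.Set.add p (pvConcat x y)) (pvConcat y x)) p)
    PySem.Set.empty
  PySem.Set.issubset pvCubes poss

-- ===== PORT B =====
-- B's 6↔9 mutation: one isdisjoint test, one update
def pvWith69 (s : PySem.Set Int) : PySem.Set Int :=
  if !PySem.Set.isdisjoint (PySem.Set.ofList [6, 9]) s then PySem.Set.update s [6, 9] else s

-- can some pair (one face from each die) be concatenated to c, in either order?
def pvForms (a b : PySem.Set Int) (c : Int) : Bool :=
  b.any (fun y => a.any (fun x =>
    (PySem.Int.ofChars? (PySem.Int.toChars x ++ PySem.Int.toChars y)).getD 0 == c ||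
    (PySem.Int.ofChars? (PySem.Int.toChars y ++ PySem.Int.toChars x)).getD 0 == c))

def forms_all_alt (a : List Int) (b : List Int) : Bool :=
  (PySem.Set.ofList ([1, 4, 9, 16, 25, 36, 49, 64, 81] : List Int)).all
    (fun c => pvForms (pvWith69 a) (pvWith69 b) c)

-- ===== PRECONDITION & SPEC =====
-- Pre_ excludes exactly the inputs where A raises ValueError: both sets nonempty and some
-- element negative (then int(f"{x}{y}") meets an interior '-').
def Pre_forms_all (a : List Int) (b : List Int) : Prop :=
  a ≠ [] → b ≠ [] → (∀ x ∈ a, 0 ≤ x) ∧ (∀ y ∈ b, 0 ≤ y)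
instance (a : List Int) (b : List Int) : Decidable (Pre_forms_all a b) := by
  unfold Pre_forms_all; infer_instance

def pvWitness_forms_all : List Int × List Int := ([1, 2, 3, 6], [4, 6, 8, 9])

def Spec_forms_all (a : List Int) (b : List Int) (out : Bool) : Prop := out = forms_all_alt a b
instance (a : List Int) (b : List Int) (out : Bool) : Decidable (Spec_forms_all a b out) := by
  unfold Spec_forms_all; infer_instance

-- ===== CLAIM (what is proved, stated in full; the proofs are below) =====
def Claim_equal_forms_all : Prop := ∀ (a : List Int) (b : List Int), Dom_forms_all a b → Pre_forms_all a b → Spec_forms_all a b (forms_all a b)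

-- ===== LEMMAS AND PROOFS =====

-- membership in the inner foldl over b2 (A's poss-building loop)
theorem pv_mem_inner (b2 : List Int) (x c : Int) (p : PySem.Set Int) :
    (c ∈ b2.foldl (fun p y =>
        PySem.Set.add (PySem.Set.add p (pvConcat x y)) (pvConcat y x)) p) ↔
      c ∈ p ∨ ∃ y ∈ b2, pvConcat x y = c ∨ pvConcat y x = c := by
  induction b2 generalizing p with
  | nil => simp
  | cons y ys ih =>
    simp only [List.foldl_cons, ih, PySem.Set.mem_add, List.mem_cons]
    constructor
    · rintro (((h | h) | h) | ⟨z, hz, h⟩)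
      · exact Or.inl h
      · exact Or.inr ⟨y, Or.inl rfl, Or.inl h.symm⟩
      · exact Or.inr ⟨y, Or.inl rfl, Or.inr h.symm⟩
      · exact Or.inr ⟨z, Or.inr hz, h⟩
    · rintro (h | ⟨z, (rfl | hz), (h | h)⟩)
      · exact Or.inl (Or.inl (Or.inl h))
      · exact Or.inl (Or.inl (Or.inr h.symm))
      · exact Or.inl (Or.inr h.symm)
      · exact Or.inr ⟨z, hz, Or.inl h⟩
      · exact Or.inr ⟨z, hz, Or.inr h⟩

-- membership in the whole poss set
theorem pv_mem_poss (a2 b2 : List Int) (c : Int) (p : PySem.Set Int) :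
    (c ∈ a2.foldl (fun p x =>
        b2.foldl (fun p y =>
          PySem.Set.add (PySem.Set.add p (pvConcat x y)) (pvConcat y x)) p) p) ↔
      c ∈ p ∨ ∃ x ∈ a2, ∃ y ∈ b2, pvConcat x y = c ∨ pvConcat y x = c := by
  induction a2 generalizing p with
  | nil => simp
  | cons x xs ih =>
    simp only [List.foldl_cons, ih, pv_mem_inner, List.mem_cons]
    constructor
    · rintro ((h | h) | ⟨z, hz, h⟩)
      · exact Or.inl h
      · obtain ⟨y, hy, hc⟩ := h; exact Or.inr ⟨x, Or.inl rfl, y, hy, hc⟩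
      · exact Or.inr ⟨z, Or.inr hz, h⟩
    · rintro (h | ⟨z, (rfl | hz), y, hy, hc⟩)
      · exact Or.inl (Or.inl h)
      · exact Or.inl (Or.inr ⟨y, hy, hc⟩)
      · exact Or.inr ⟨z, hz, y, hy, hc⟩

-- B's inline int(str(x)+str(y)) is A's helper, definitionally
theorem pvConcat_eq (x y : Int) :
    (PySem.Int.ofChars? (PySem.Int.toChars x ++ PySem.Int.toChars y)).getD 0 = pvConcat x y := rfl

-- the two mutation helpers produce membership-equal sets
theorem pv_mem_with69 (s : PySem.Set Int) (x : Int) :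
    x ∈ pvWith69 s ↔ x ∈ pvMut s := by
  unfold pvWith69 pvMut
  have hd : PySem.Set.isdisjoint (PySem.Set.ofList [(6 : Int), 9]) s = true ↔
      (6 : Int) ∉ s ∧ (9 : Int) ∉ s := by
    simp [PySem.Set.isdisjoint_iff, PySem.Set.mem_ofList]
  by_cases h6 : (6 : Int) ∈ s <;> by_cases h9 : (9 : Int) ∈ s
  · have hd' : PySem.Set.isdisjoint (PySem.Set.ofList [(6 : Int), 9]) s = false := by
      rw [Bool.eq_false_iff]; intro h; exact (hd.1 h).1 h6
    simp [hd', h6, h9]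
  · have hd' : PySem.Set.isdisjoint (PySem.Set.ofList [(6 : Int), 9]) s = false := by
      rw [Bool.eq_false_iff]; intro h; exact (hd.1 h).1 h6
    simp [hd', h6, h9]
  · have hd' : PySem.Set.isdisjoint (PySem.Set.ofList [(6 : Int), 9]) s = false := by
      rw [Bool.eq_false_iff]; intro h; exact (hd.1 h).2 h9
    simp [hd', h6, h9]
  · have hd' : PySem.Set.isdisjoint (PySem.Set.ofList [(6 : Int), 9]) s = true :=
      hd.2 ⟨h6, h9⟩
    simp [hd', h6, h9]

-- ===== VERDICT (by name: the statement is the Claim_ definition above) =====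
theorem forms_all_spec : Claim_equal_forms_all := by
  intro a b _ _
  unfold Spec_forms_all forms_all forms_all_alt
  rw [Bool.eq_iff_iff]
  simp only [pvForms, pvCubes, PySem.Set.issubset_iff, List.all_eq_true, List.any_eq_true,
    pvConcat_eq, pv_mem_poss, pv_mem_with69, Bool.or_eq_true, beq_iff_eq]
  constructor
  · intro h c hc
    rcases h c hc with h' | ⟨x, hx, y, hy, hc'⟩
    · simp [PySem.Set.empty] at h'
    · exact ⟨y, hy, x, hx, by tauto⟩
  · intro h c hc
    obtain ⟨y, hy, x, hx, hc'⟩ := h c hc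
    exact Or.inr ⟨x, hx, y, hy, by tauto⟩
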